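-- pv_equiv track=rewrite | github.com/AdityaGandhi26/Route-Calculator | routeCalcHuddle.py | allRoutesExactLength
-- ===== SOURCE A (Python) =====
-- def allRoutesExactLength(graph, start, end, pathLength, path=[]):
--     path = path + [start]
--
--     if start == end and len(path) == pathLength+1:
--         return [path]
--
--     if start not in graph:
--         return []
--
--     if pathLength == 0:
--         return []
--
--     if len(path) > pathLength:
--         return []
--
--     paths = []
--
--     for node in graph[start]:
--         newpaths = allRoutesExactLength(graph, node, end, pathLength, path)
--
--         for newpath in newpaths:
--             paths.append(newpath)
--
--     return paths
-- ===== SOURCE B (Python) =====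
-- # B: level-synchronous BFS (frontier of partial paths extended round by round)
-- # instead of A's recursive DFS; all hits have the same length, so the final
-- # filter reproduces A's output order exactly.
-- def allRoutesExactLength(graph, start, end, pathLength, path=[]):
--     rounds = pathLength - len(path)
--     if rounds < 0:
--         return []
--     frontier = [path + [start]]
--     for _ in range(rounds):
--         if not frontier:
--             return []
--         frontier = [q + [nb] for q in frontier if q[-1] in graph for nb in graph[q[-1]]]
--     return [q for q in frontier if q[-1] == end]
-- ===== Notes on version B (the rewrite author's own statement) =====
-- stated objective: alternative
-- what changed: Replaces A's recursive depth-first search with a level-synchronous breadth-first search: a frontier of partial paths is extended one edge per round for pathLength-len(path) rounds (stopping early when the frontier empties), and the final frontier is filtered for paths ending at end; since every successful path has the same length, the output order matches A's exactly.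
import Mathlib
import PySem

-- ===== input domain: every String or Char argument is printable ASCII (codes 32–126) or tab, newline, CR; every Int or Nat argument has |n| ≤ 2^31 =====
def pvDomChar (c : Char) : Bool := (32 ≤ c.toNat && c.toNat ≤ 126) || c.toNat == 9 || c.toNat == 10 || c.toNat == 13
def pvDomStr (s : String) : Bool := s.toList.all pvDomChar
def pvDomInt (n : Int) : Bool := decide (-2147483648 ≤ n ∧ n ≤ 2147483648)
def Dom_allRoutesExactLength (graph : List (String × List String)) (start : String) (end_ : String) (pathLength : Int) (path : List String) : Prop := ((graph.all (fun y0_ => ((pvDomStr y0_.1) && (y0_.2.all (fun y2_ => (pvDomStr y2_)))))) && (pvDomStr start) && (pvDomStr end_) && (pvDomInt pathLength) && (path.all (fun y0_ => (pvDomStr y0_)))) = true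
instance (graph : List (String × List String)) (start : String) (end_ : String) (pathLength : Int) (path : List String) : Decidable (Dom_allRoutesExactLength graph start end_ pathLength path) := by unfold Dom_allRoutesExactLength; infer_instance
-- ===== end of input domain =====

-- B replaces A's recursive DFS by a level-synchronous BFS over a frontier of
-- partial paths; all successful paths have the same length, so the output list
-- is identical to A's (objective: alternative decomposition, same cost).

-- ===== PORT A =====
-- literal transliteration of A's recursion; the dict is the association list
-- `graph`, looked up via PySem.Dict.get? (first match, as Python's dict lookup).
def allRoutesExactLength (graph : List (String × List String)) (start : String) (end_ : String) (pathLength : Int) (path : List String) : List (List String) :=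
  -- Python rebinds `path = path + [start]`; the rebound value is written out inline
  if start = end_ ∧ (((path ++ [start]).length : Int)) = pathLength + 1 then [path ++ [start]]
  else
    match (PySem.Dict.mk graph).get? start with
    | none => []
    | some nbrs =>
      if pathLength = 0 then []
      else if h : (((path ++ [start]).length : Int)) > pathLength then []
      else nbrs.attach.foldl
        (fun paths node => paths ++ allRoutesExactLength graph node.1 end_ pathLength (path ++ [start])) []
termination_by (pathLength + 1 - path.length).toNat
decreasing_by
  simp only [List.length_append, List.length_cons, List.length_nil, not_lt] at h ⊢
  omega

-- ===== PORT B =====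
-- one BFS round: extend every frontier path by each neighbour of its last node
-- (`q.getLast!` ports Python's q[-1]; frontier paths are never empty in B's runs)
def pvAltStep (graph : List (String × List String)) (frontier : List (List String)) : List (List String) :=
  frontier.flatMap (fun q =>
    match (PySem.Dict.mk graph).get? q.getLast! with
    | some nbrs => nbrs.map (fun nb => q ++ [nb])
    | none => [])

-- the `for _ in range(rounds)` loop with the early `if not frontier: return []`
def pvAltLoop (graph : List (String × List String)) : Nat → List (List String) → List (List String)
  | 0, frontier => frontier
  | n+1, frontier => if frontier = [] then [] else pvAltLoop graph n (pvAltStep graph frontier)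

def allRoutesExactLength_alt (graph : List (String × List String)) (start : String) (end_ : String) (pathLength : Int) (path : List String) : List (List String) :=
  let rounds := pathLength - path.length
  if rounds < 0 then []
  else (pvAltLoop graph rounds.toNat [path ++ [start]]).filter (fun q => q.getLast! == end_)

-- ===== PRECONDITION & SPEC =====
def Spec_allRoutesExactLength (graph : List (String × List String)) (start : String) (end_ : String) (pathLength : Int) (path : List String) (out : List (List String)) : Prop := out = allRoutesExactLength_alt graph start end_ pathLength path
instance (graph : List (String × List String)) (start : String) (end_ : String) (pathLength : Int) (path : List String) (out : List (List String)) : Decidable (Spec_allRoutesExactLength graph start end_ pathLength path out) := by unfold Spec_allRoutesExactLength; infer_instance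

-- ===== CLAIM (what is proved, stated in full; the proofs are below) =====
def Claim_equal_allRoutesExactLength : Prop := ∀ (graph : List (String × List String)) (start : String) (end_ : String) (pathLength : Int) (path : List String), Dom_allRoutesExactLength graph start end_ pathLength path → Spec_allRoutesExactLength graph start end_ pathLength path (allRoutesExactLength graph start end_ pathLength path)

-- ===== LEMMAS AND PROOFS =====

theorem pvMap_eq_flatMap {α β : Type} (f : α → β) (l : List α) :
    l.map f = l.flatMap (fun x => [f x]) := by
  induction l with
  | nil => rfl
  | cons a t iht => simp only [List.map_cons, List.flatMap_cons, iht]; rfl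

theorem pvFlatMap_attach {α : Type} {β : Type} (l : List α) (f : α → List β) :
    l.attach.flatMap (fun x => f x.1) = l.flatMap f := by
  conv_rhs => rw [← List.attach_map_subtype_val l]
  rw [List.flatMap_map]

theorem pvAltLoop_nil (graph : List (String × List String)) (n : Nat) :
    pvAltLoop graph n [] = [] := by
  cases n <;> simp [pvAltLoop]

theorem pvAltStep_append (graph : List (String × List String)) (F G : List (List String)) :
    pvAltStep graph (F ++ G) = pvAltStep graph F ++ pvAltStep graph G := by
  simp [pvAltStep]

theorem pvAltLoop_succ (graph : List (String × List String)) (n : Nat) (F : List (List String)) :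
    pvAltLoop graph (n + 1) F = pvAltLoop graph n (pvAltStep graph F) := by
  by_cases h : F = []
  · subst h; simp [pvAltLoop, pvAltStep, pvAltLoop_nil]
  · simp [pvAltLoop, h]

theorem pvAltLoop_append (graph : List (String × List String)) (n : Nat)
    (F G : List (List String)) :
    pvAltLoop graph n (F ++ G) = pvAltLoop graph n F ++ pvAltLoop graph n G := by
  induction n generalizing F G with
  | zero => simp [pvAltLoop]
  | succ n ih =>
    rw [pvAltLoop_succ, pvAltLoop_succ, pvAltLoop_succ, pvAltStep_append, ih]

theorem pvAltLoop_flatMap (graph : List (String × List String)) (n : Nat)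
    (xs : List String) (f : String → List (List String)) :
    pvAltLoop graph n (xs.flatMap f) = xs.flatMap (fun x => pvAltLoop graph n (f x)) := by
  induction xs with
  | nil => simp [pvAltLoop_nil]
  | cons x xs ih => simp [List.flatMap_cons, pvAltLoop_append, ih]

-- the main invariant: A's recursion equals "run the remaining BFS rounds, then filter"
theorem pvMain (graph : List (String × List String)) (end_ : String) (L : Int) :
    ∀ (n : Nat) (path : List String) (start : String), L - path.length = n →
      allRoutesExactLength graph start end_ L path
        = (pvAltLoop graph n [path ++ [start]]).filter (fun q => q.getLast! == end_) := by
  intro n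
  induction n with
  | zero =>
    intro path start hn
    have hL : L = path.length := by omega
    rw [allRoutesExactLength.eq_def]
    simp only [pvAltLoop]
    by_cases hse : start = end_
    · have : start = end_ ∧ ((path ++ [start]).length : Int) = L + 1 := by
        refine ⟨hse, ?_⟩; simp [hL]
      rw [if_pos this]
      simp [hse]
    · have hc : ¬ (start = end_ ∧ ((path ++ [start]).length : Int) = L + 1) := by
        intro h; exact hse h.1
      rw [if_neg hc]
      have hfilter : ([path ++ [start]].filter (fun q => q.getLast! == end_)) = [] := by
        simp [hse]
      rw [hfilter]
      cases hget : (PySem.Dict.mk graph).get? start with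
      | none => rfl
      | some nbrs =>
        dsimp only
        by_cases hz : L = 0
        · simp [hz]
        · rw [if_neg hz]
          have hgt : ((path ++ [start]).length : Int) > L := by
            simp only [List.length_append, List.length_cons, List.length_nil]
            push_cast
            omega
          rw [dif_pos hgt]
  | succ n ih =>
    intro path start hn
    have hlen : (path.length : Int) + 1 ≤ L := by omega
    rw [allRoutesExactLength.eq_def]
    have hc : ¬ (start = end_ ∧ ((path ++ [start]).length : Int) = L + 1) := by
      rintro ⟨-, h2⟩
      simp only [List.length_append, List.length_cons, List.length_nil] at h2
      push_cast at h2
      omega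
    rw [if_neg hc]
    rw [pvAltLoop_succ]
    have hstep : pvAltStep graph [path ++ [start]]
        = (match (PySem.Dict.mk graph).get? start with
           | some nbrs => nbrs.map (fun nb => (path ++ [start]) ++ [nb])
           | none => []) := by
      simp [pvAltStep]
    cases hget : (PySem.Dict.mk graph).get? start with
    | none =>
      rw [hstep, hget]
      simp [pvAltLoop_nil]
    | some nbrs =>
      dsimp only
      have hz : ¬ L = 0 := by omega
      rw [if_neg hz]
      have hgt : ¬ ((path ++ [start]).length : Int) > L := by
        simp only [List.length_append, List.length_cons, List.length_nil]
        push_cast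
        omega
      rw [dif_neg hgt]
      rw [hstep, hget]
      have hmap := pvMap_eq_flatMap (fun nb => (path ++ [start]) ++ [nb]) nbrs
      dsimp only
      rw [hmap, pvAltLoop_flatMap, List.filter_flatMap]
      have hfold : ∀ (acc : List (List String)),
          nbrs.attach.foldl
            (fun paths node => paths ++ allRoutesExactLength graph node.1 end_ L (path ++ [start])) acc
          = acc ++ nbrs.flatMap (fun nb => allRoutesExactLength graph nb end_ L (path ++ [start])) := by
        intro acc
        rw [PySem.List.foldl_append_eq_flatMap]
        exact congrArg (acc ++ ·)
          (pvFlatMap_attach nbrs (fun nb => allRoutesExactLength graph nb end_ L (path ++ [start])))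
      rw [hfold]
      simp only [List.nil_append]
      congr 1
      funext nb
      have hrec : L - ((path ++ [start]).length : Int) = n := by
        simp only [List.length_append, List.length_cons, List.length_nil]
        push_cast
        omega
      exact (ih (path ++ [start]) nb hrec)

-- ===== VERDICT (by name: the statement is the Claim_ definition above) =====
theorem allRoutesExactLength_spec : Claim_equal_allRoutesExactLength := by
  unfold Claim_equal_allRoutesExactLength Spec_allRoutesExactLength
  intro graph start end_ L path _
  unfold allRoutesExactLength_alt
  by_cases hneg : L - (path.length : Int) < 0
  · rw [if_pos hneg]
    rw [allRoutesExactLength.eq_def]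
    have hc : ¬ (start = end_ ∧ ((path ++ [start]).length : Int) = L + 1) := by
      rintro ⟨-, h2⟩
      simp only [List.length_append, List.length_cons, List.length_nil] at h2
      push_cast at h2
      omega
    rw [if_neg hc]
    cases hget : (PySem.Dict.mk graph).get? start with
    | none => rfl
    | some nbrs =>
      dsimp only
      by_cases hz : L = 0
      · simp [hz]
      · rw [if_neg hz]
        have hgt : ((path ++ [start]).length : Int) > L := by
          simp only [List.length_append, List.length_cons, List.length_nil]
          push_cast
          omega
        rw [dif_pos hgt]
  · rw [if_neg hneg]
    exact pvMain graph end_ L (L - (path.length : Int)).toNat path start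
      (by omega)
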